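-- pv_equiv track=rewrite | github.com/Torfab/adventOfCodeAndOtherEvents | everybodycodes/TSDD/q9.py | checkPotentialParents
-- ===== SOURCE A (Python) =====
-- def checkPotentialParents(seq1, seq2, seq3):
--   seq2Count=0
--   seq3Count=0
--   for i in range(len(seq1)):
--     inside=False
--     if seq1[i]==seq2[i]:
--       inside=True
--       seq2Count=seq2Count+1
--     if seq1[i]==seq3[i]:
--       inside=True
--       seq3Count=seq3Count+1
--     if not inside:
--       return -1
--
--   return seq2Count*seq3Count
-- ===== SOURCE B (Python) =====
-- def checkPotentialParents(seq1, seq2, seq3):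
--   codes = [(a == b, a == c) for a, b, c in zip(seq1, seq2, seq3)]
--   if (False, False) in codes:
--     return -1
--   both = codes.count((True, True))
--   return (codes.count((True, False)) + both) * (codes.count((False, True)) + both)
-- ===== Notes on version B (the rewrite author's own statement) =====
-- stated objective: alternative
-- what changed: Instead of a stateful index loop with an 'inside' flag and two running counters, B classifies each aligned position into a match-type code (matches-seq2, matches-seq3), builds the list of codes in one zip pass, and derives the answer afterwards by membership ((False,False) present -> -1) and closed-form count arithmetic on the code list.
import Mathlib
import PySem

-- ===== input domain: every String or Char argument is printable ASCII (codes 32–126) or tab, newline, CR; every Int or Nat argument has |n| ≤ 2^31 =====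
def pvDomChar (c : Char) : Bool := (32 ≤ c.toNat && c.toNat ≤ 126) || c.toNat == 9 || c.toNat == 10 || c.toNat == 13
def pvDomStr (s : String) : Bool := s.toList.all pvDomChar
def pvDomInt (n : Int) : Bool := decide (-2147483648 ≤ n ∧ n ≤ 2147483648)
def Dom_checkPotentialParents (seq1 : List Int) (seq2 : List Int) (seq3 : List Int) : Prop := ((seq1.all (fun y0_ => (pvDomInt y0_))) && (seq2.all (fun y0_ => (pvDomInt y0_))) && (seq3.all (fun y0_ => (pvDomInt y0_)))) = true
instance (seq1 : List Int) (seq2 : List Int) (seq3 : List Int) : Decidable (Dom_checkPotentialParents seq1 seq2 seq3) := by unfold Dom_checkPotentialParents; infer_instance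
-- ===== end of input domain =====

-- B replaces A's stateful index loop (an 'inside' flag and two running counters with early return)
-- by classifying each zipped position into a match-type code and deriving the result from membership
-- and counts on the code list; objective: alternative (same cost, different decomposition).


-- ===== PORT A =====
-- the for-loop over range(len(seq1)); out-of-range indexing (Python IndexError) is excluded by Pre_,
-- the port reads 0 there via getD
def checkPotentialParentsLoop (seq1 : List Int) (seq2 : List Int) (seq3 : List Int) :
    List Int → Int → Int → Int
  | [], seq2Count, seq3Count => seq2Count * seq3Count
  | i :: rest, seq2Count, seq3Count =>
    let s1 := (PySem.List.pyGet? seq1 i).getD 0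
    let s2 := (PySem.List.pyGet? seq2 i).getD 0
    let s3 := (PySem.List.pyGet? seq3 i).getD 0
    let inside := false
    let inside := if s1 = s2 then true else inside
    let seq2Count := if s1 = s2 then seq2Count + 1 else seq2Count
    let inside := if s1 = s3 then true else inside
    let seq3Count := if s1 = s3 then seq3Count + 1 else seq3Count
    if !inside then -1
    else checkPotentialParentsLoop seq1 seq2 seq3 rest seq2Count seq3Count

def checkPotentialParents (seq1 : List Int) (seq2 : List Int) (seq3 : List Int) : Int :=
  checkPotentialParentsLoop seq1 seq2 seq3 (PySem.List.pyRange 0 seq1.length 1) 0 0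

-- ===== PORT B =====
-- codes = [(a == b, a == c) for a, b, c in zip(seq1, seq2, seq3)]; then membership and counts
def checkPotentialParents_alt (seq1 : List Int) (seq2 : List Int) (seq3 : List Int) : Int :=
  let codes := (seq1.zip (seq2.zip seq3)).map (fun t => (t.1 == t.2.1, t.1 == t.2.2))
  if codes.contains (false, false) then -1
  else
    let both : Int := codes.count (true, true)
    ((codes.count (true, false) : Int) + both) * ((codes.count (false, true) : Int) + both)

-- ===== PRECONDITION & SPEC =====
-- Pre_ excludes exactly the inputs on which the Python A raises IndexError: the loop reaches an
-- index i (every earlier index was in range of seq2/seq3 and matched one of them) with i out of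
-- range of seq2 or seq3.
def Pre_checkPotentialParents (seq1 : List Int) (seq2 : List Int) (seq3 : List Int) : Prop :=
  ∀ i, i < seq1.length →
    (∀ j, j < i → j < seq2.length ∧ j < seq3.length ∧
        (seq1.getD j 0 = seq2.getD j 0 ∨ seq1.getD j 0 = seq3.getD j 0)) →
    i < seq2.length ∧ i < seq3.length
instance (seq1 : List Int) (seq2 : List Int) (seq3 : List Int) : Decidable (Pre_checkPotentialParents seq1 seq2 seq3) := by unfold Pre_checkPotentialParents; infer_instance

def pvWitness_checkPotentialParents : List Int × List Int × List Int := ([1, 2, 7], [1, 5, 7], [0, 2, 7])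

def Spec_checkPotentialParents (seq1 : List Int) (seq2 : List Int) (seq3 : List Int) (out : Int) : Prop := out = checkPotentialParents_alt seq1 seq2 seq3
instance (seq1 : List Int) (seq2 : List Int) (seq3 : List Int) (out : Int) : Decidable (Spec_checkPotentialParents seq1 seq2 seq3 out) := by unfold Spec_checkPotentialParents; infer_instance

-- ===== CLAIM (what is proved, stated in full; the proofs are below) =====
def Claim_equal_checkPotentialParents : Prop := ∀ (seq1 : List Int) (seq2 : List Int) (seq3 : List Int), Dom_checkPotentialParents seq1 seq2 seq3 → Pre_checkPotentialParents seq1 seq2 seq3 → Spec_checkPotentialParents seq1 seq2 seq3 (checkPotentialParents seq1 seq2 seq3)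
-- ===== LEMMAS AND PROOFS =====

-- seq1[i] == seq2[i] under A's getD-0 reading of out-of-range (Pre_ keeps indices in range)
def pvEq (seqa : List Int) (seqb : List Int) (i : Int) : Bool :=
  (PySem.List.pyGet? seqa i).getD 0 == (PySem.List.pyGet? seqb i).getD 0

-- One iteration of A's loop, expressed through the two match tests.
theorem loop_cons (seq1 seq2 seq3 : List Int) (i : Int) (rest : List Int) (c2 c3 : Int) :
    checkPotentialParentsLoop seq1 seq2 seq3 (i :: rest) c2 c3 =
      if pvEq seq1 seq2 i || pvEq seq1 seq3 i then
        checkPotentialParentsLoop seq1 seq2 seq3 rest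
          (if pvEq seq1 seq2 i then c2 + 1 else c2)
          (if pvEq seq1 seq3 i then c3 + 1 else c3)
      else -1 := by
  by_cases h2 : (PySem.List.pyGet? seq1 i).getD 0 = (PySem.List.pyGet? seq2 i).getD 0 <;>
    by_cases h3 : (PySem.List.pyGet? seq1 i).getD 0 = (PySem.List.pyGet? seq3 i).getD 0 <;>
      simp [checkPotentialParentsLoop, pvEq, h2, h3]

-- If every index in idxs matches seq2 or seq3, A's loop adds the two match counts and multiplies.
theorem loop_of_all_match (seq1 seq2 seq3 : List Int) (idxs : List Int) (c2 c3 : Int)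
    (h : ∀ i ∈ idxs, pvEq seq1 seq2 i = true ∨ pvEq seq1 seq3 i = true) :
    checkPotentialParentsLoop seq1 seq2 seq3 idxs c2 c3 =
      (c2 + (idxs.countP (fun i => pvEq seq1 seq2 i) : Int))
        * (c3 + (idxs.countP (fun i => pvEq seq1 seq3 i) : Int)) := by
  induction idxs generalizing c2 c3 with
  | nil => simp [checkPotentialParentsLoop]
  | cons i rest ih =>
    have hi := h i (by simp)
    have hrest : ∀ j ∈ rest, pvEq seq1 seq2 j = true ∨ pvEq seq1 seq3 j = true :=
      fun j hj => h j (by simp [hj])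
    rw [loop_cons]
    have hor : (pvEq seq1 seq2 i || pvEq seq1 seq3 i) = true := by
      rcases hi with h' | h' <;> simp [h']
    rw [if_pos hor, ih _ _ hrest]
    rcases h2 : pvEq seq1 seq2 i <;> rcases h3 : pvEq seq1 seq3 i <;>
      simp only [List.countP_cons, h2, h3, if_true, if_false, Bool.false_eq_true] <;>
      push_cast <;> ring

-- If some index in idxs matches neither sequence, A's loop returns -1.
theorem loop_of_bad (seq1 seq2 seq3 : List Int) (idxs : List Int) (c2 c3 : Int)
    (h : ∃ i ∈ idxs, pvEq seq1 seq2 i = false ∧ pvEq seq1 seq3 i = false) :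
    checkPotentialParentsLoop seq1 seq2 seq3 idxs c2 c3 = -1 := by
  induction idxs generalizing c2 c3 with
  | nil => simp at h
  | cons i rest ih =>
    rw [loop_cons]
    rcases h with ⟨j, hj, hbad⟩
    rcases List.mem_cons.mp hj with rfl | hj'
    · rw [if_neg]
      simp [hbad.1, hbad.2]
    · by_cases hor : (pvEq seq1 seq2 i || pvEq seq1 seq3 i) = true
      · rw [if_pos hor]; exact ih _ _ ⟨j, hj', hbad⟩
      · rw [if_neg hor]

theorem pvEq_natCast (seqa seqb : List Int) (j : Nat) :
    pvEq seqa seqb (j : Int) = (seqa.getD j 0 == seqb.getD j 0) := by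
  simp [pvEq, PySem.List.pyGet?_natCast, List.getD_eq_getElem?_getD]

-- splitting a Bool count by a second test
theorem countP_split {α : Type} (l : List α) (f g : α → Bool) :
    l.countP f = l.countP (fun x => f x && g x) + l.countP (fun x => f x && !g x) := by
  induction l with
  | nil => simp
  | cons x t ih =>
    simp only [List.countP_cons]
    cases f x <;> cases g x <;> simp <;> omega

-- Pre_ dichotomy: all indices in range, or a bad in-range index exists
theorem pre_dichotomy (seq1 seq2 seq3 : List Int)
    (hpre : Pre_checkPotentialParents seq1 seq2 seq3) :
    (∀ i, i < seq1.length → i < seq2.length ∧ i < seq3.length) ∨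
    (∃ j, j < seq1.length ∧ j < seq2.length ∧ j < seq3.length ∧
      ¬(seq1.getD j 0 = seq2.getD j 0 ∨ seq1.getD j 0 = seq3.getD j 0)) := by
  by_cases hall : ∀ i, i < seq1.length → i < seq2.length ∧ i < seq3.length
  · exact Or.inl hall
  · right
    have hP : ∃ i, i < seq1.length ∧ ¬(i < seq2.length ∧ i < seq3.length) := by
      push Not at hall
      rcases hall with ⟨i, hi, h⟩
      exact ⟨i, hi, by omega⟩
    classical
    let i0 := Nat.find hP
    have h0 : i0 < seq1.length ∧ ¬(i0 < seq2.length ∧ i0 < seq3.length) := Nat.find_spec hP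
    have hmin : ∀ j, j < i0 → j < seq2.length ∧ j < seq3.length := by
      intro j hj
      have := Nat.find_min hP hj
      have hjl : j < seq1.length := by omega
      by_contra hc
      exact this ⟨hjl, hc⟩
    by_cases hmatch : ∀ j, j < i0 →
        (seq1.getD j 0 = seq2.getD j 0 ∨ seq1.getD j 0 = seq3.getD j 0)
    · exfalso
      exact h0.2 (hpre i0 h0.1 (fun j hj => ⟨(hmin j hj).1, (hmin j hj).2, hmatch j hj⟩))
    · push Not at hmatch
      rcases hmatch with ⟨j, hj, hbad⟩
      exact ⟨j, by omega, (hmin j hj).1, (hmin j hj).2, by tauto⟩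

-- ===== VERDICT (by name: the statement is the Claim_ definition above) =====
-- the code list of B, characterised as a map over range when all indices are in range
theorem codes_eq (seq1 seq2 seq3 : List Int)
    (h2 : seq1.length ≤ seq2.length) (h3 : seq1.length ≤ seq3.length) :
    (seq1.zip (seq2.zip seq3)).map (fun t => ((t.1 == t.2.1 : Bool), (t.1 == t.2.2 : Bool))) =
      (List.range seq1.length).map
        (fun j => ((seq1.getD j 0 == seq2.getD j 0 : Bool), (seq1.getD j 0 == seq3.getD j 0 : Bool))) := by
  apply List.ext_getElem
  · simp; omega
  · intro i hi hi'
    have h1 : i < seq1.length := by simp at hi'; omega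
    have hzl : i < (seq1.zip (seq2.zip seq3)).length := by simp; omega
    simp only [List.getElem_map, List.getElem_zip, List.getElem_range]
    rw [List.getD_eq_getElem seq1 0 h1, List.getD_eq_getElem seq2 0 (by omega),
        List.getD_eq_getElem seq3 0 (by omega)]

-- ===== VERDICT (by name: the statement is the Claim_ definition above) =====
theorem checkPotentialParents_spec : Claim_equal_checkPotentialParents := by
  intro seq1 seq2 seq3 _hdom hpre
  unfold Spec_checkPotentialParents checkPotentialParents checkPotentialParents_alt
  have hidxs := PySem.List.pyRange_zero_natCast seq1.length
  rcases pre_dichotomy seq1 seq2 seq3 hpre with hall | ⟨j, hj1, hj2, hj3, hbad⟩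
  case inr =>
    -- a bad in-range index exists: both sides return -1
    have hA : checkPotentialParentsLoop seq1 seq2 seq3
        (PySem.List.pyRange 0 (seq1.length : Int) 1) 0 0 = -1 := by
      apply loop_of_bad
      refine ⟨(j : Int), ?_, ?_, ?_⟩
      · rw [hidxs]; exact List.mem_map.mpr ⟨j, List.mem_range.mpr hj1, rfl⟩
      · rw [pvEq_natCast]; simp only [beq_eq_false_iff_ne, ne_eq]; tauto
      · rw [pvEq_natCast]; simp only [beq_eq_false_iff_ne, ne_eq]; tauto
    have hmem : ((false, false) : Bool × Bool) ∈
        (seq1.zip (seq2.zip seq3)).map (fun t => ((t.1 == t.2.1 : Bool), (t.1 == t.2.2 : Bool))) := by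
      have hzl : j < (seq1.zip (seq2.zip seq3)).length := by simp; omega
      refine List.mem_map.mpr ⟨(seq1.zip (seq2.zip seq3))[j], List.getElem_mem hzl, ?_⟩
      simp only [List.getElem_zip]
      rw [List.getD_eq_getElem seq1 0 hj1, List.getD_eq_getElem seq2 0 hj2,
          List.getD_eq_getElem seq3 0 hj3] at hbad
      simp only [Prod.mk.injEq, beq_eq_false_iff_ne, ne_eq]
      constructor <;> intro h <;> exact hbad (by tauto)
    rw [hA]
    rw [if_pos (by simpa using List.elem_eq_true_of_mem hmem)]
  case inl =>
    have h2 : seq1.length ≤ seq2.length := by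
      rcases Nat.eq_zero_or_pos seq1.length with h | h
      · omega
      · have := hall (seq1.length - 1) (by omega); omega
    have h3 : seq1.length ≤ seq3.length := by
      rcases Nat.eq_zero_or_pos seq1.length with h | h
      · omega
      · have := hall (seq1.length - 1) (by omega); omega
    rw [codes_eq seq1 seq2 seq3 h2 h3]
    have hcnt2 : (PySem.List.pyRange 0 (seq1.length : Int) 1).countP (fun i => pvEq seq1 seq2 i)
        = (List.range seq1.length).countP (fun j => seq1.getD j 0 == seq2.getD j 0) := by
      rw [hidxs, List.countP_map]
      exact List.countP_congr (fun j _ => by simp [Function.comp, pvEq_natCast])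
    have hcnt3 : (PySem.List.pyRange 0 (seq1.length : Int) 1).countP (fun i => pvEq seq1 seq3 i)
        = (List.range seq1.length).countP (fun j => seq1.getD j 0 == seq3.getD j 0) := by
      rw [hidxs, List.countP_map]
      exact List.countP_congr (fun j _ => by simp [Function.comp, pvEq_natCast])
    have hcTT : ((List.range seq1.length).map
          (fun j => ((seq1.getD j 0 == seq2.getD j 0 : Bool), (seq1.getD j 0 == seq3.getD j 0 : Bool)))).count
          ((true, true) : Bool × Bool)
        = (List.range seq1.length).countP
            (fun j => (seq1.getD j 0 == seq2.getD j 0) && (seq1.getD j 0 == seq3.getD j 0)) := by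
      rw [List.count_eq_countP, List.countP_map]
      exact List.countP_congr (fun j _ => by
        cases hb2 : (seq1.getD j 0 == seq2.getD j 0) <;>
          cases hb3 : (seq1.getD j 0 == seq3.getD j 0) <;>
            simp only [Function.comp_apply, hb2, hb3] <;> decide)
    have hcTF : ((List.range seq1.length).map
          (fun j => ((seq1.getD j 0 == seq2.getD j 0 : Bool), (seq1.getD j 0 == seq3.getD j 0 : Bool)))).count
          ((true, false) : Bool × Bool)
        = (List.range seq1.length).countP
            (fun j => (seq1.getD j 0 == seq2.getD j 0) && !(seq1.getD j 0 == seq3.getD j 0)) := by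
      rw [List.count_eq_countP, List.countP_map]
      exact List.countP_congr (fun j _ => by
        cases hb2 : (seq1.getD j 0 == seq2.getD j 0) <;>
          cases hb3 : (seq1.getD j 0 == seq3.getD j 0) <;>
            simp only [Function.comp_apply, hb2, hb3] <;> decide)
    have hcFT : ((List.range seq1.length).map
          (fun j => ((seq1.getD j 0 == seq2.getD j 0 : Bool), (seq1.getD j 0 == seq3.getD j 0 : Bool)))).count
          ((false, true) : Bool × Bool)
        = (List.range seq1.length).countP
            (fun j => !(seq1.getD j 0 == seq2.getD j 0) && (seq1.getD j 0 == seq3.getD j 0)) := by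
      rw [List.count_eq_countP, List.countP_map]
      exact List.countP_congr (fun j _ => by
        cases hb2 : (seq1.getD j 0 == seq2.getD j 0) <;>
          cases hb3 : (seq1.getD j 0 == seq3.getD j 0) <;>
            simp only [Function.comp_apply, hb2, hb3] <;> decide)
    have hs2 := countP_split (List.range seq1.length)
      (fun j => ((seq1.getD j 0 == seq2.getD j 0 : Bool)))
      (fun j => ((seq1.getD j 0 == seq3.getD j 0 : Bool)))
    have hs3 : (List.range seq1.length).countP (fun j => (seq1.getD j 0 == seq3.getD j 0))
        = (List.range seq1.length).countP
            (fun j => (seq1.getD j 0 == seq2.getD j 0) && (seq1.getD j 0 == seq3.getD j 0))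
          + (List.range seq1.length).countP
            (fun j => !(seq1.getD j 0 == seq2.getD j 0) && (seq1.getD j 0 == seq3.getD j 0)) := by
      rw [countP_split (List.range seq1.length)
        (fun j => ((seq1.getD j 0 == seq3.getD j 0 : Bool)))
        (fun j => ((seq1.getD j 0 == seq2.getD j 0 : Bool)))]
      congr 1
      · exact List.countP_congr (fun j _ => by rw [Bool.and_comm])
      · exact List.countP_congr (fun j _ => by rw [Bool.and_comm])
    by_cases hb : ∃ j ∈ List.range seq1.length,
        seq1.getD j 0 ≠ seq2.getD j 0 ∧ seq1.getD j 0 ≠ seq3.getD j 0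
    · rcases hb with ⟨j, hj, hb2, hb3⟩
      have hc : (((List.range seq1.length).map
          (fun j => ((seq1.getD j 0 == seq2.getD j 0 : Bool), (seq1.getD j 0 == seq3.getD j 0 : Bool)))).contains
          ((false, false) : Bool × Bool)) = true := by
        rw [List.contains_iff_mem]
        refine List.mem_map.mpr ⟨j, hj, ?_⟩
        simp only [Prod.mk.injEq, beq_eq_false_iff_ne, ne_eq]
        exact ⟨hb2, hb3⟩
      rw [if_pos hc]
      apply loop_of_bad
      exact ⟨(j : Int), by rw [hidxs]; exact List.mem_map.mpr ⟨j, hj, rfl⟩,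
        by rw [pvEq_natCast]; exact beq_eq_false_iff_ne.mpr hb2,
        by rw [pvEq_natCast]; exact beq_eq_false_iff_ne.mpr hb3⟩
    · have hgood : ∀ j ∈ List.range seq1.length,
          (seq1.getD j 0 == seq2.getD j 0) = true ∨ (seq1.getD j 0 == seq3.getD j 0) = true := by
        intro j hj
        by_contra hc
        rw [not_or] at hc
        exact hb ⟨j, hj, fun h => hc.1 (beq_iff_eq.mpr h), fun h => hc.2 (beq_iff_eq.mpr h)⟩
      have hnm : ((false, false) : Bool × Bool) ∉ (List.range seq1.length).map
          (fun j => ((seq1.getD j 0 == seq2.getD j 0 : Bool), (seq1.getD j 0 == seq3.getD j 0 : Bool))) := by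
        intro hm
        rcases List.mem_map.mp hm with ⟨j, hj, hje⟩
        rcases hgood j hj with h | h <;> rw [h] at hje <;> simp at hje
      have hc : (((List.range seq1.length).map
          (fun j => ((seq1.getD j 0 == seq2.getD j 0 : Bool), (seq1.getD j 0 == seq3.getD j 0 : Bool)))).contains
          ((false, false) : Bool × Bool)) = false := by
        cases hcv : (((List.range seq1.length).map
            (fun j => ((seq1.getD j 0 == seq2.getD j 0 : Bool), (seq1.getD j 0 == seq3.getD j 0 : Bool)))).contains
            ((false, false) : Bool × Bool)) with
        | false => rfl
        | true => exact absurd (List.contains_iff_mem.mp hcv) hnm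
      rw [if_neg (by rw [hc]; decide)]
      have hm : ∀ i ∈ PySem.List.pyRange 0 (seq1.length : Int) 1,
          pvEq seq1 seq2 i = true ∨ pvEq seq1 seq3 i = true := by
        intro i hi
        rw [hidxs] at hi
        rcases List.mem_map.mp hi with ⟨j, hj, rfl⟩
        rw [pvEq_natCast, pvEq_natCast]
        exact hgood j hj
      rw [loop_of_all_match seq1 seq2 seq3 _ 0 0 hm]
      rw [hcnt2, hcnt3, hcTT, hcTF, hcFT, hs2, hs3]
      push_cast
      ring
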